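-- pv_equiv track=rewrite | github.com/zdan2/kyopro2 | abc/abc413/b.py | f
-- ===== SOURCE A (Python) =====
-- def f(words,i=0,memo=None):
--     if i==len(words):
--         return len(memo)
--     if memo==None:
--         memo=set()
--     cur=words[i]
--     for j in range(len(words)):
--         if i==j:
--             continue
--         memo.add(cur+words[j])
--     return f(words,i+1,memo)
-- ===== SOURCE B (Python) =====
-- def f(words, i=0, memo=None):
--     seen = set() if memo is None else memo
--     while i != len(words):
--         cur = words[i]
--         seen.update(cur + w for j, w in enumerate(words) if j != i)
--         i += 1
--     return len(seen)
-- ===== Notes on version B (the rewrite author's own statement) =====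
-- stated objective: simpler
-- what changed: Replaces A's recursion-with-accumulator and its element-by-element inner loop by a plain while loop that bulk-updates one set from an enumerate-based generator; Pre_ excludes only the inputs on which A raises (i beyond +-len(words), or memo=None with i=len(words), where A computes len(None)).
import Mathlib
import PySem

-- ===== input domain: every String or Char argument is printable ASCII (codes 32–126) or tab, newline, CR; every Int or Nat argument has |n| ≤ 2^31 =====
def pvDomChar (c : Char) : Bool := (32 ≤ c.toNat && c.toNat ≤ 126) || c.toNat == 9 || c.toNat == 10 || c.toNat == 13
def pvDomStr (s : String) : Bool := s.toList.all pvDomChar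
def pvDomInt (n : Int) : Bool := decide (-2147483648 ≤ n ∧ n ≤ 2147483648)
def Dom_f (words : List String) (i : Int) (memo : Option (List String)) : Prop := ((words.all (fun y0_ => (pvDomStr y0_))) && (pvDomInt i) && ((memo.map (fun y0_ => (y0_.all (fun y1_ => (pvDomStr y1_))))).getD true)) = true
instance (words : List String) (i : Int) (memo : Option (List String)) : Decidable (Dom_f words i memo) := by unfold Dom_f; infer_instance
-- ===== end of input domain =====

-- B replaces A's recursion-with-accumulator by a while loop that bulk-updates one set from an
-- enumerate-based generator (objective: simpler). Both programs mutate a passed-in memo set in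
-- place; the equivalence proved here is about the return value. A Python set arrives as the list
-- of its (distinct) elements, so PySem.Set.ofList is applied where each port receives it.

-- ===== PORT A =====
-- inner 'for j in range(len(words))' loop of A (cur = words[i]; j from range(len) is in range, so getD is exact)
def addPairsA (words : List String) (i : Int) (m : List String) : List String :=
  (List.range words.length).foldl
    (fun (acc : List String) (j : Nat) => if i = (j : Int) then acc
                  else PySem.Set.add acc ((PySem.List.pyGet? words i).getD "" ++ words.getD j "")) m

def f (words : List String) (i : Int) (memo : Option (List String)) : Int :=
  if i = (words.length : Int) then ((PySem.Set.ofList (memo.getD [])).length : Int)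
  else if (words.length : Int) < i then 0  -- Python recurses forever here; guard only for totality (outside Pre_)
  else f words (i + 1) (some (addPairsA words i (PySem.Set.ofList (memo.getD []))))
termination_by ((words.length : Int) - i).toNat
decreasing_by omega

-- ===== PORT B =====
-- B's generator '(cur + w for j, w in enumerate(words) if j != i)' with cur = words[i]
def pairsAt (words : List String) (i : Int) : List String :=
  (PySem.List.enumerate words).filterMap (fun p =>
    if p.1 ≠ i then some ((PySem.List.pyGet? words i).getD "" ++ p.2) else none)

-- B's 'while i != len(words)' loop carrying the growing set
def loopB (words : List String) (i : Int) (seen : List String) : Int :=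
  if i = (words.length : Int) then (seen.length : Int)
  else if (words.length : Int) < i then 0  -- Python's words[i] raises IndexError here (outside Pre_)
  else loopB words (i + 1) (PySem.Set.update seen (pairsAt words i))
termination_by ((words.length : Int) - i).toNat
decreasing_by omega

def f_alt (words : List String) (i : Int) (memo : Option (List String)) : Int :=
  loopB words i (PySem.Set.ofList (memo.getD []))

-- ===== PRECONDITION & SPEC =====
-- Pre_ excludes only inputs where A raises: i < -len(words) (IndexError), i > len(words)
-- (the base case is never reached: RecursionError), and memo=None with i = len(words)
-- (TypeError: len(None)).
def Pre_f (words : List String) (i : Int) (memo : Option (List String)) : Prop :=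
  -(words.length : Int) ≤ i ∧
  ((memo = none ∧ i < (words.length : Int)) ∨ (memo ≠ none ∧ i ≤ (words.length : Int)))
instance (words : List String) (i : Int) (memo : Option (List String)) : Decidable (Pre_f words i memo) := by unfold Pre_f; infer_instance

def pvWitness_f : List String × Int × Option (List String) := (["ab", "c"], 0, none)

def Spec_f (words : List String) (i : Int) (memo : Option (List String)) (out : Int) : Prop := out = f_alt words i memo
instance (words : List String) (i : Int) (memo : Option (List String)) (out : Int) : Decidable (Spec_f words i memo out) := by unfold Spec_f; infer_instance

-- ===== CLAIM (what is proved, stated in full; the proofs are below) =====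
def Claim_equal_f : Prop := ∀ (words : List String) (i : Int) (memo : Option (List String)), Dom_f words i memo → Pre_f words i memo → Spec_f words i memo (f words i memo)

-- ===== LEMMAS AND PROOFS =====

lemma nodup_foldl_add (l s : List String) (h : s.Nodup) :
    (l.foldl PySem.Set.add s).Nodup := by
  induction l generalizing s with
  | nil => simpa
  | cons x xs ih => exact ih _ (PySem.Set.nodup_add _ _ h)

lemma foldl_add_eq_append (l s : List String) (h : (s ++ l).Nodup) :
    l.foldl PySem.Set.add s = s ++ l := by
  induction l generalizing s with
  | nil => simp
  | cons x xs ih =>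
    have hx : x ∉ s := fun hmem =>
      (List.disjoint_of_nodup_append h) hmem (by simp)
    have hadd : PySem.Set.add s x = s ++ [x] := by
      simp [PySem.Set.add, PySem.Set.contains]
      intro hc
      exact absurd hc hx
    rw [List.foldl_cons, hadd, ih (s ++ [x]) (by simpa using h)]
    simp

lemma ofList_eq_self (l : List String) (h : l.Nodup) : PySem.Set.ofList l = l := by
  have := foldl_add_eq_append l [] (by simpa using h)
  simpa [PySem.Set.ofList, PySem.Set.empty] using this

-- a fold that skips the i-th index equals folding Set.add over the filterMap of the same list
lemma foldl_skip_eq_filterMap (i : Int) (cur : String) (g : Nat → String)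
    (l : List Nat) (m : List String) :
    l.foldl (fun acc (j : Nat) => if i = (j : Int) then acc else PySem.Set.add acc (cur ++ g j)) m
      = (l.filterMap (fun (j : Nat) =>
          if (j : Int) ≠ i then some (cur ++ g j) else none)).foldl PySem.Set.add m := by
  induction l generalizing m with
  | nil => simp
  | cons j js ih =>
    rw [List.foldl_cons, List.filterMap_cons]
    by_cases h : i = (j : Int)
    · rw [if_pos h, if_neg (by omega)]
      exact ih m
    · rw [if_neg h, if_pos (by omega), List.foldl_cons]
      exact ih _

-- A's inner loop produces exactly B's set.update with B's generator list
lemma addPairsA_eq_update (words : List String) (i : Int) (m : List String) :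
    addPairsA words i m = PySem.Set.update m (pairsAt words i) := by
  have hgen : pairsAt words i
      = (List.range words.length).filterMap (fun (j : Nat) =>
          if (j : Int) ≠ i then some ((PySem.List.pyGet? words i).getD "" ++ words.getD j "") else none) := by
    unfold pairsAt
    rw [PySem.List.enumerate_eq_map_pyRange (d := ""), List.filterMap_map]
    rw [PySem.List.pyRange_one, List.filterMap_map]
    simp
  rw [PySem.Set.update, hgen]
  unfold addPairsA
  exact foldl_skip_eq_filterMap i _ _ _ m

lemma f_loop_eq (words : List String) (k : Nat) (i : Int) (l : List String)
    (hle : i ≤ (words.length : Int)) (hk : ((words.length : Int) - i).toNat = k) :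
    f words i (some l) = loopB words i (PySem.Set.ofList l) := by
  induction k generalizing i l with
  | zero =>
    have hi : i = (words.length : Int) := by omega
    subst hi
    rw [f.eq_def, loopB.eq_def]
    simp
  | succ k ih =>
    have hi : i < (words.length : Int) := by omega
    rw [f.eq_def, loopB.eq_def]
    rw [if_neg (by omega), if_neg (by omega), if_neg (by omega), if_neg (by omega)]
    simp only [Option.getD_some]
    have hnd : (addPairsA words i (PySem.Set.ofList l)).Nodup := by
      rw [addPairsA_eq_update, PySem.Set.update]
      exact nodup_foldl_add _ _ (PySem.Set.nodup_ofList l)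
    rw [ih (i + 1) _ (by omega) (by omega), ofList_eq_self _ hnd, addPairsA_eq_update]

-- ===== VERDICT (by name: the statement is the Claim_ definition above) =====
theorem f_spec : Claim_equal_f := by
  intro words i memo _ hpre
  unfold Spec_f f_alt
  obtain ⟨hlo, hpre⟩ := hpre
  rcases hpre with ⟨hm, hhi⟩ | ⟨hm, hhi⟩
  · subst hm
    have h0 : f words i none = f words i (some []) := by
      conv_lhs => rw [f.eq_def]
      conv_rhs => rw [f.eq_def]
      simp only [Option.getD_some, Option.getD_none]
    rw [h0, f_loop_eq words ((words.length : Int) - i).toNat i [] (by omega) rfl]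
    rfl
  · obtain ⟨l, rfl⟩ := Option.ne_none_iff_exists'.mp hm
    rw [f_loop_eq words ((words.length : Int) - i).toNat i l (by omega) rfl]
    rfl
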